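-- pv_equiv track=rewrite | github.com/harshinidinesh/renewable-energy-economic-impact-project | my_code_and_data/utils.py | lst_to_dct
-- ===== SOURCE A (Python) =====
-- def lst_to_dct(lst):
--     '''Convert from 2d list to dictionary where keys are the header (column)
--     and data is list of the values in the column
--     '''
--     data_dct = {}
--     for i in range(len(lst[0])):
--         header_col = lst[0][i]
--         data_dct[header_col] = []
--         for row in lst[1:]:
--             data_dct[header_col].append(row[i])
--     return data_dct
-- ===== SOURCE B (Python) =====
-- def lst_to_dct(lst):
--     '''Convert from 2d list to dictionary where keys are the header (column)
--     and data is list of the values in the column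
--     '''
--     header = lst[0]
--     cols = [[] for _ in header]
--     for row in lst[1:]:
--         for col, cell in zip(cols, row):
--             col.append(cell)
--     return dict(zip(header, cols))
-- ===== Notes on version B (the rewrite author's own statement) =====
-- stated objective: alternative
-- what changed: A is column-major (for each header index it rescans all data rows appending cell by cell into the dict); B is a row-major single pass: it allocates one accumulator per column, scans the data rows once appending each row's cells across all accumulators via zip, and only then builds the dict with dict(zip(header, cols)).
import Mathlib
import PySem

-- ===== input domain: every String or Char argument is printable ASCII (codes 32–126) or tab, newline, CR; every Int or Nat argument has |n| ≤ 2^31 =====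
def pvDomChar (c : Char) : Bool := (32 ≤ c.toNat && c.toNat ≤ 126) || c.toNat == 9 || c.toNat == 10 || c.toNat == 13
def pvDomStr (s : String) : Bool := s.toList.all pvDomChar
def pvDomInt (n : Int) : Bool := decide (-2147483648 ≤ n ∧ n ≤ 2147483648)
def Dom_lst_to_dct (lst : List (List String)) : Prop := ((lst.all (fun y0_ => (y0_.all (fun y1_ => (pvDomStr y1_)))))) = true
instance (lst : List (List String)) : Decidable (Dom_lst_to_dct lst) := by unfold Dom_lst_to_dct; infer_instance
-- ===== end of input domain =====

-- B replaces A's column-major nested loops (per header index, rescan all rows) by a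
-- row-major single pass over the data rows into per-column accumulators (alternative decomposition, same cost).

-- ===== PORT A =====
-- lst[0] is lst.headD [] (the empty-list case raises in Python and is excluded by Pre_);
-- in-range indexing is PySem.List.pyGetD (out-of-range raises in Python and is excluded by Pre_).
def lst_to_dct (lst : List (List String)) : List (String × List String) :=
  ((PySem.List.pyRange 0 ((lst.headD []).length : Int) 1).foldl
    (fun d i =>
      let h := PySem.List.pyGetD (lst.headD []) i ""
      (PySem.List.slice lst (some 1) none).foldl
        (fun d row => d.modify h [] (fun v => v ++ [PySem.List.pyGetD row i ""]))
        (d.insert h []))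
    PySem.Dict.empty).items

-- ===== PORT B =====
-- 'for col, cell in zip(cols, row): col.append(cell)' mutates the zipped prefix of cols
-- and leaves the remaining accumulators (cols.drop row.length) unchanged.
def lst_to_dct_alt (lst : List (List String)) : List (String × List String) :=
  let header := lst.headD []
  let cols0 : List (List String) := header.map (fun _ => [])
  let cols := (PySem.List.slice lst (some 1) none).foldl
    (fun cols row => (List.zipWith (fun c cell => c ++ [cell]) cols row) ++ cols.drop row.length)
    cols0
  (PySem.Dict.ofList (header.zip cols)).items

-- ===== PRECONDITION & SPEC =====
-- Pre_ excludes exactly the inputs where A raises IndexError: the empty list (lst[0])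
-- and any input with a data row shorter than the header row (row[i]).
def Pre_lst_to_dct (lst : List (List String)) : Prop :=
  lst ≠ [] ∧ ∀ row ∈ lst, (lst.headD []).length ≤ row.length
instance (lst : List (List String)) : Decidable (Pre_lst_to_dct lst) := by
  unfold Pre_lst_to_dct; infer_instance
def pvWitness_lst_to_dct : List (List String) := [["a", "b"], ["1", "2"], ["3", "4"]]

def Spec_lst_to_dct (lst : List (List String)) (out : List (String × List String)) : Prop :=
  out = lst_to_dct_alt lst
instance (lst : List (List String)) (out : List (String × List String)) : Decidable (Spec_lst_to_dct lst out) := by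
  unfold Spec_lst_to_dct; infer_instance

-- ===== CLAIM (what is proved, stated in full; the proofs are below) =====
def Claim_equal_lst_to_dct : Prop := ∀ (lst : List (List String)), Dom_lst_to_dct lst → Pre_lst_to_dct lst → Spec_lst_to_dct lst (lst_to_dct lst)

-- ===== LEMMAS AND PROOFS =====

-- A's inner loop: insert-then-append-per-row builds the whole column at once
lemma inner_loop (rows : List (List String)) (g : List String → String) (h : String)
    (d : PySem.Dict String (List String)) (acc : List String) :
    rows.foldl (fun d row => d.modify h [] (fun v => v ++ [g row])) (d.insert h acc)
      = d.insert h (acc ++ rows.map g) := by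
  induction rows generalizing acc with
  | nil => simp
  | cons r rs ih =>
    simp only [List.foldl_cons, List.map_cons]
    have hstep : (d.insert h acc).modify h [] (fun v => v ++ [g r]) = d.insert h (acc ++ [g r]) := by
      simp [PySem.Dict.modify, PySem.Dict.getD_insert_self, PySem.Dict.insert_insert_self]
    rw [hstep, ih (acc ++ [g r])]
    simp

-- B's row loop: when every row covers all columns, it builds exactly the columns
lemma cols_loop (rows : List (List String)) (cols : List (List String))
    (h : ∀ r ∈ rows, cols.length ≤ r.length) :
    rows.foldl
      (fun cols row => (List.zipWith (fun c cell => c ++ [cell]) cols row) ++ cols.drop row.length)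
      cols
      = (List.range cols.length).map (fun j => cols.getD j [] ++ rows.map (fun r => r.getD j "")) := by
  induction rows generalizing cols with
  | nil =>
    simp only [List.foldl_nil, List.map_nil, List.append_nil]
    apply List.ext_getElem
    · simp
    · intro j h1 h2
      simp [List.getD_eq_getElem?_getD, List.getElem?_eq_getElem h1]
  | cons r rs ih =>
    have hle : cols.length ≤ r.length := h r List.mem_cons_self
    have hdrop : cols.drop r.length = [] := List.drop_eq_nil_of_le hle
    simp only [List.foldl_cons, hdrop, List.append_nil]
    have hlen : (List.zipWith (fun c cell => c ++ [cell]) cols r).length = cols.length := by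
      simp [List.length_zipWith, Nat.min_eq_left hle]
    rw [ih _ (by intro r' hr'; rw [hlen]; exact h r' (List.mem_cons_of_mem _ hr'))]
    rw [hlen]
    apply List.map_congr_left
    intro j hj
    rw [List.mem_range] at hj
    have hjr : j < r.length := lt_of_lt_of_le hj hle
    rw [List.getD_eq_getElem _ _ (by rw [hlen]; exact hj), List.getD_eq_getElem _ _ hj,
        List.getElem_zipWith]
    simp [List.getElem?_eq_getElem hjr]

-- ===== VERDICT (by name: the statement is the Claim_ definition above) =====
theorem lst_to_dct_spec : Claim_equal_lst_to_dct := by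
  intro lst _ hpre
  unfold Spec_lst_to_dct
  obtain ⟨hne, hlen⟩ := hpre
  match lst with
  | hdr :: rows =>
    simp only [List.headD_cons] at hlen ⊢
    unfold lst_to_dct lst_to_dct_alt
    simp only [List.headD_cons, PySem.List.slice_from_one, List.tail_cons]
    rw [cols_loop rows (hdr.map (fun _ => []))
      (by intro r hr; rw [List.length_map]; exact hlen r (List.mem_cons_of_mem _ hr))]
    rw [List.length_map]
    -- turn the zip into a map over the range of column indices
    have hzip : hdr.zip ((List.range hdr.length).map
        (fun j => (hdr.map (fun _ => ([] : List String))).getD j [] ++ rows.map (fun r => r.getD j "")))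
        = (List.range hdr.length).map
          (fun j => (hdr.getD j "", rows.map (fun r => r.getD j ""))) := by
      apply List.ext_getElem
      · simp
      · intro j h1 h2
        have hj : j < hdr.length := by simpa using h2
        rw [List.getElem_zip]
        simp [List.getD_eq_getElem?_getD, hj]
    rw [hzip]
    -- A side: pyRange to List.range, inner loop to a single insert
    rw [PySem.List.pyRange_one, List.foldl_map]
    simp only [PySem.Dict.ofList, PySem.Dict.update, List.foldl_map]
    apply congrArg PySem.Dict.items
    apply List.foldl_ext
    intro d j hj
    rw [List.mem_range] at hj
    rw [inner_loop rows (fun row => PySem.List.pyGetD row (0 + (j : Int)) "") _]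
    simp only [zero_add, PySem.List.pyGetD_natCast, List.nil_append]
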